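-- pv_equiv track=rewrite | github.com/socna/rlcard | rlcard/games/dummy/melding.py | is_set_meld
-- ===== SOURCE A (Python) =====
-- from typing import List
--
-- def get_rank_id(card_id: int):
--     return card_id % 13
--
-- def is_set_meld(cards: List[int]):
--
--     i = 0
--     while(i < len(cards) - 1):
--         j = i+1
--         if get_rank_id(cards[i])  != get_rank_id(cards[j]):
--             return False
--         i = i+1
--
--     return True
-- ===== SOURCE B (Python) =====
-- def get_rank_id(card_id: int):
--     return card_id % 13
--
-- def is_set_meld(cards):
--     ranks = {get_rank_id(c) for c in cards}
--     return len(ranks) <= 1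
-- ===== Notes on version B (the rewrite author's own statement) =====
-- stated objective: idiomatic
-- what changed: Replaces A's index-driven while loop of adjacent-rank comparisons with a set comprehension collecting all distinct ranks followed by a cardinality check (len <= 1).
import Mathlib
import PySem

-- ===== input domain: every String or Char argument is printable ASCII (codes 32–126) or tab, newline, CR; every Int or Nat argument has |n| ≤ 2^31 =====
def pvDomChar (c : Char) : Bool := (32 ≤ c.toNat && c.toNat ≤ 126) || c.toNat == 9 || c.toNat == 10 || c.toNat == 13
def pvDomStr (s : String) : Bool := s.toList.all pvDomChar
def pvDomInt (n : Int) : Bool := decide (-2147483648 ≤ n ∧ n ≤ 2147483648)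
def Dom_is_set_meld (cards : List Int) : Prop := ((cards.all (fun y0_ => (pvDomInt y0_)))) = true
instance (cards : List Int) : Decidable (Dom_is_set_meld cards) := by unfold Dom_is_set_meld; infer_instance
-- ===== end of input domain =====

-- B replaces A's adjacent-comparison while loop by collecting the set of distinct ranks and checking its cardinality (idiomatic; same behaviour, return value only).

-- ===== PORT A =====
-- helper get_rank_id
def get_rank_id (card_id : Int) : Int := PySem.Int.mod card_id 13

-- the while loop of A, with loop variable i; terminates because cards.length - i decreases
def is_set_meld_loop (cards : List Int) (i : Nat) : Bool :=
  if (i : Int) < (cards.length : Int) - 1 then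
    let j := i + 1
    if get_rank_id (PySem.List.pyGetD cards (i : Int) 0) ≠ get_rank_id (PySem.List.pyGetD cards (j : Int) 0) then
      false
    else
      is_set_meld_loop cards (i + 1)
  else
    true
termination_by cards.length - i
decreasing_by omega

def is_set_meld (cards : List Int) : Bool := is_set_meld_loop cards 0

-- ===== PORT B =====
def is_set_meld_alt (cards : List Int) : Bool :=
  let ranks : PySem.Set Int := PySem.Set.ofList (cards.map (fun c => get_rank_id c))
  decide (PySem.Set.len ranks ≤ 1)

-- ===== PRECONDITION & SPEC =====
def Spec_is_set_meld (cards : List Int) (out : Bool) : Prop := out = is_set_meld_alt cards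
instance (cards : List Int) (out : Bool) : Decidable (Spec_is_set_meld cards out) := by unfold Spec_is_set_meld; infer_instance

-- ===== CLAIM (what is proved, stated in full; the proofs are below) =====
def Claim_equal_is_set_meld : Prop := ∀ (cards : List Int), Dom_is_set_meld cards → Spec_is_set_meld cards (is_set_meld cards)

-- ===== LEMMAS AND PROOFS =====

-- proof-side canonical form: adjacent ranks all equal
def chainEq : List Int → Bool
  | [] => true
  | [_] => true
  | a :: b :: t => (get_rank_id a == get_rank_id b) && chainEq (b :: t)

-- the loop at index i+1 on x::xs is the loop at index i on xs
theorem loop_shift (n : Nat) : ∀ (xs : List Int) (x : Int) (i : Nat), xs.length - i ≤ n →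
    is_set_meld_loop (x :: xs) (i + 1) = is_set_meld_loop xs i := by
  induction n with
  | zero =>
    intro xs x i h
    conv_lhs => rw [is_set_meld_loop]
    conv_rhs => rw [is_set_meld_loop]
    have h1 : ¬ (((i + 1 : Nat) : Int) < ((x :: xs).length : Int) - 1) := by
      simp only [List.length_cons]; push_cast; omega
    have h2 : ¬ ((i : Int) < (xs.length : Int) - 1) := by omega
    rw [if_neg h1, if_neg h2]
  | succ n ih =>
    intro xs x i h
    conv_lhs => rw [is_set_meld_loop]
    conv_rhs => rw [is_set_meld_loop]
    have g1 : PySem.List.pyGetD (x :: xs) (((i + 1 : Nat)) : Int) 0 = PySem.List.pyGetD xs ((i : Nat) : Int) 0 := by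
      rw [PySem.List.pyGetD_natCast, PySem.List.pyGetD_natCast]; simp
    have g2 : PySem.List.pyGetD (x :: xs) (((i + 1 + 1 : Nat)) : Int) 0 = PySem.List.pyGetD xs (((i + 1 : Nat)) : Int) 0 := by
      rw [PySem.List.pyGetD_natCast, PySem.List.pyGetD_natCast]; simp
    by_cases hlt : (i : Int) < (xs.length : Int) - 1
    · have hlt' : (((i + 1 : Nat)) : Int) < ((x :: xs).length : Int) - 1 := by
        simp only [List.length_cons]; push_cast; omega
      rw [if_pos hlt', if_pos hlt]
      simp only [g1, g2]
      split
      · rfl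
      · exact ih xs x (i + 1) (by omega)
    · have hlt' : ¬ ((((i + 1 : Nat)) : Int) < ((x :: xs).length : Int) - 1) := by
        simp only [List.length_cons]; push_cast; omega
      rw [if_neg hlt', if_neg hlt]

theorem loop_eq_chainEq : ∀ (cards : List Int), is_set_meld_loop cards 0 = chainEq cards := by
  intro cards
  induction cards with
  | nil =>
    conv_lhs => rw [is_set_meld_loop]
    have h1 : ¬ (((0 : Nat) : Int) < (([] : List Int).length : Int) - 1) := by
      simp
    rw [if_neg h1]; rfl
  | cons a t ih =>
    cases t with
    | nil =>
      conv_lhs => rw [is_set_meld_loop]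
      have h1 : ¬ (((0 : Nat) : Int) < (([a] : List Int).length : Int) - 1) := by simp
      rw [if_neg h1]; rfl
    | cons b t' =>
      conv_lhs => rw [is_set_meld_loop]
      have hc : ((0 : Nat) : Int) < (((a :: b :: t').length : Nat) : Int) - 1 := by
        simp only [List.length_cons]; push_cast; omega
      have h0 : PySem.List.pyGetD (a :: b :: t') ((0 : Nat) : Int) 0 = a := by
        rw [PySem.List.pyGetD_natCast]; rfl
      have h1 : PySem.List.pyGetD (a :: b :: t') (((0 + 1 : Nat)) : Int) 0 = b := by
        rw [PySem.List.pyGetD_natCast]; rfl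
      have hshift : is_set_meld_loop (a :: b :: t') (0 + 1) = is_set_meld_loop (b :: t') 0 :=
        loop_shift (b :: t').length (b :: t') a 0 (by omega)
      rw [if_pos hc]
      simp only [h0, h1, hshift, ih]
      simp only [chainEq]
      by_cases he : get_rank_id a = get_rank_id b
      · simp [he]
      · simp [he]

-- chainEq (a :: t) means every rank in t equals rank a
theorem chainEq_cons_eq_all : ∀ (t : List Int) (a : Int),
    chainEq (a :: t) = t.all (fun b => get_rank_id b == get_rank_id a) := by
  intro t
  induction t with
  | nil => intro a; simp [chainEq]
  | cons b t' ih =>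
    intro a
    simp only [chainEq, ih b, List.all_cons]
    by_cases he : get_rank_id a = get_rank_id b
    · simp [he]
    · have h1 : (get_rank_id a == get_rank_id b) = false := by
        simp [he]
      have h2 : (get_rank_id b == get_rank_id a) = false := by
        simp only [beq_eq_false_iff_ne, ne_eq]
        exact fun h => he h.symm
      rw [h1, h2]
      simp

-- folding Set.add never shrinks the set
theorem foldl_add_len_mono : ∀ (l : List Int) (s : PySem.Set Int),
    s.length ≤ (List.foldl PySem.Set.add s l).length := by
  intro l
  induction l with
  | nil => intro s; simp
  | cons x l' ih =>
    intro s
    have h1 : s.length ≤ (PySem.Set.add s x).length := by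
      simp only [PySem.Set.add]
      split <;> simp
    exact le_trans h1 (ih _)

theorem foldl_add_singleton_len_le_one : ∀ (l : List Int) (a : Int),
    ((List.foldl PySem.Set.add [a] l).length ≤ 1) ↔ (l.all (fun b => b == a) = true) := by
  intro l
  induction l with
  | nil => intro a; simp
  | cons b l' ih =>
    intro a
    simp only [List.foldl_cons, List.all_cons]
    by_cases he : b = a
    · have : PySem.Set.add [a] b = [a] := by
        simp [PySem.Set.add, PySem.Set.contains, he]
      rw [this]
      simp [he, ih a]
    · have hne : PySem.Set.add [a] b = [a, b] := by
        simp [PySem.Set.add, PySem.Set.contains, he]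
      rw [hne]
      have h2 : 2 ≤ (List.foldl PySem.Set.add [a, b] l').length := by
        have := foldl_add_len_mono l' [a, b]
        simpa using this
      constructor
      · intro h; omega
      · intro h; simp [beq_iff_eq, he] at h

-- ===== VERDICT (by name: the statement is the Claim_ definition above) =====
theorem is_set_meld_spec : Claim_equal_is_set_meld := by
  intro cards _
  unfold Spec_is_set_meld is_set_meld is_set_meld_alt
  rw [loop_eq_chainEq]
  cases cards with
  | nil => simp [chainEq, PySem.Set.ofList, PySem.Set.len]
  | cons a t =>
    rw [chainEq_cons_eq_all]
    have hof : PySem.Set.ofList ((a :: t).map (fun c => get_rank_id c)) =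
        List.foldl PySem.Set.add [get_rank_id a] (t.map (fun c => get_rank_id c)) := by
      rw [PySem.Set.ofList_eq_foldl]
      simp only [List.map_cons, List.foldl_cons]
      rfl
    have hlen := foldl_add_singleton_len_le_one (t.map (fun c => get_rank_id c)) (get_rank_id a)
    simp only [List.all_map, Function.comp_def] at hlen
    simp only [hof, PySem.Set.len]
    by_cases hall : (t.all fun b => get_rank_id b == get_rank_id a) = true
    · rw [hall]
      have h1 := hlen.mpr hall
      symm
      rw [decide_eq_true_iff]
      exact_mod_cast h1
    · simp only [Bool.not_eq_true] at hall
      rw [hall]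
      symm
      rw [decide_eq_false_iff_not]
      intro hle
      have h1 : (List.foldl PySem.Set.add [get_rank_id a] (t.map fun c => get_rank_id c)).length ≤ 1 := by
        exact_mod_cast hle
      rw [hlen.mp h1] at hall
      simp at hall
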